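-- pv_equiv track=rewrite | github.com/kbpositive/machine-learning | ReinforcementLearning/chessPaths/chessPaths.py | makeMoves
-- ===== SOURCE A (Python) =====
-- def makeMoves(initMoves):
--     moves = [[0, 0]]
--     for _ in range(4):
--         for index, [row, col] in enumerate(initMoves):
--             moves.append([row, col])
--             initMoves[index][0], initMoves[index][1] = (
--                 initMoves[index][1],
--                 -initMoves[index][0],
--             )
--     return moves
-- ===== SOURCE B (Python) =====
-- def makeMoves(initMoves):
--     # element-major: compute all four rotations of each move in one pass,
--     # then transpose to round-major order
--     quads = [([r, c], [c, -r], [-r, -c], [-c, r]) for r, c in initMoves]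
--     q0, q1, q2, q3 = zip(*quads) if quads else ((), (), (), ())
--     return [[0, 0], *q0, *q1, *q2, *q3]
-- ===== Notes on version B (the rewrite author's own statement) =====
-- stated objective: alternative
-- what changed: B is element-major: a single pass computes all four rotations of each move at once as quadruples, then a zip(*) transpose restores round-major order, instead of A's four successive rounds that mutate initMoves in place.
import Mathlib
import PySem

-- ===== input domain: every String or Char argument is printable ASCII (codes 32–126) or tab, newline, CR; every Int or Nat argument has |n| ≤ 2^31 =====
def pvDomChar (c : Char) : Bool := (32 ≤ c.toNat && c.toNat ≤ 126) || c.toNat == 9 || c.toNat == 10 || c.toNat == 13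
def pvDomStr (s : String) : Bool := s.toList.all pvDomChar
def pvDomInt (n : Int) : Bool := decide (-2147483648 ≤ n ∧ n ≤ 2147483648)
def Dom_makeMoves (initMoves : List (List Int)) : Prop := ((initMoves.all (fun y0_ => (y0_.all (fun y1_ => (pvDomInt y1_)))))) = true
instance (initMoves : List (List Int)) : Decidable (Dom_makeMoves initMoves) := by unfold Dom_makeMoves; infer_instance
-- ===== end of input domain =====

-- B computes all four rotations of each move element-major in one pass, then transposes to
-- round-major order; A mutates initMoves in place but restores it after 4 rounds (B leaves it
-- untouched, so the net side effect matches); equivalence is about the return value.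


-- ===== PORT A =====
-- one inner-loop step of A: read [row, col] at index, append it, rotate the entry in place
def stepA (st : List (List Int) × List (List Int)) (i : Nat) : List (List Int) × List (List Int) :=
  match st.2[i]? with
  | some [row, col] => (st.1 ++ [[row, col]], st.2.set i [col, -row])
  | _ => st  -- Python raises ValueError here (unpacking); unreachable under Pre_

def makeMoves (initMoves : List (List Int)) : List (List Int) :=
  ((List.range 4).foldl
    (fun st _ => (List.range st.2.length).foldl stepA st)
    ([[0, 0]], initMoves)).1

-- ===== PORT B =====
-- the comprehension: one quadruple of rotated moves per entry ('for r, c in initMoves' raises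
-- ValueError on a non-2-element entry; unreachable under Pre_)
def quadsB (initMoves : List (List Int)) :
    List (List Int × List Int × List Int × List Int) :=
  initMoves.map (fun l =>
    match l with
    | [r, c] => ([r, c], [c, -r], [-r, -c], [-c, r])
    | _ => ([], [], [], []))

def makeMoves_alt (initMoves : List (List Int)) : List (List Int) :=
  let quads := quadsB initMoves
  -- zip(*quads): the transpose, i.e. the four component projections
  [[0, 0]] ++ quads.map (·.1) ++ quads.map (·.2.1)
    ++ quads.map (·.2.2.1) ++ quads.map (·.2.2.2)

-- ===== PRECONDITION & SPEC =====
-- Pre_ excludes exactly the inputs where Python A raises ValueError: an entry that is not a 2-element list.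
def Pre_makeMoves (initMoves : List (List Int)) : Prop := ∀ l ∈ initMoves, l.length = 2
instance (initMoves : List (List Int)) : Decidable (Pre_makeMoves initMoves) := by unfold Pre_makeMoves; infer_instance
def pvWitness_makeMoves : List (List Int) := [[1, 2], [2, -1]]
def Spec_makeMoves (initMoves : List (List Int)) (out : List (List Int)) : Prop := out = makeMoves_alt initMoves
instance (initMoves : List (List Int)) (out : List (List Int)) : Decidable (Spec_makeMoves initMoves out) := by unfold Spec_makeMoves; infer_instance

-- ===== CLAIM (what is proved, stated in full; the proofs are below) =====
def Claim_equal_makeMoves : Prop := ∀ (initMoves : List (List Int)), Dom_makeMoves initMoves → Pre_makeMoves initMoves → Spec_makeMoves initMoves (makeMoves initMoves)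

-- ===== LEMMAS AND PROOFS =====
-- rotation of one entry, as A performs it
def rot1 (l : List Int) : List Int :=
  match l with
  | [r, c] => [c, -r]
  | _ => l

-- A's inner loop over a suffix, indices starting at pre.length
lemma inner_range' (suf : List (List Int)) : ∀ (pre moves : List (List Int)),
    (∀ l ∈ suf, l.length = 2) →
    (List.range' pre.length suf.length).foldl stepA (moves, pre ++ suf)
      = (moves ++ suf, pre ++ suf.map rot1) := by
  induction suf with
  | nil => intro pre moves _; simp
  | cons l suf ih =>
    intro pre moves h
    obtain ⟨r, c, rfl⟩ : ∃ r c, l = [r, c] := by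
      have := h l (by simp)
      match l with
      | [r, c] => exact ⟨r, c, rfl⟩
    have hget : (pre ++ [r, c] :: suf)[pre.length]? = some [r, c] := by
      simp
    have hset : (pre ++ [r, c] :: suf).set pre.length [c, -r] = (pre ++ [[c, -r]]) ++ suf := by
      rw [List.set_append_right _ _ (le_refl _)]
      simp
    rw [List.length_cons, List.range'_succ, List.foldl_cons]
    show (List.range' (pre.length + 1) suf.length).foldl stepA (stepA (moves, pre ++ [r, c] :: suf) pre.length) = _
    rw [show stepA (moves, pre ++ [r, c] :: suf) pre.length
          = (moves ++ [[r, c]], (pre ++ [[c, -r]]) ++ suf) by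
        simp only [stepA, hget, hset]]
    have hl : pre.length + 1 = (pre ++ [[c, -r]]).length := by simp
    rw [hl, ih (pre ++ [[c, -r]]) (moves ++ [[r, c]]) (fun x hx => h x (by simp [hx]))]
    simp [rot1]

lemma inner_round (im moves : List (List Int)) (h : ∀ l ∈ im, l.length = 2) :
    (List.range im.length).foldl stepA (moves, im) = (moves ++ im, im.map rot1) := by
  have := inner_range' im [] moves h
  simpa [List.range_eq_range'] using this

lemma rot1_len (im : List (List Int)) (h : ∀ l ∈ im, l.length = 2) :
    ∀ l ∈ im.map rot1, l.length = 2 := by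
  intro l hl
  simp only [List.mem_map] at hl
  obtain ⟨x, hx, rfl⟩ := hl
  have := h x hx
  match x with
  | [r, c] => simp [rot1]

-- each projection of B's quadruples is a map of a transform over the input
lemma quads_proj (im : List (List Int)) (h : ∀ l ∈ im, l.length = 2)
    (p : List Int × List Int × List Int × List Int → List Int)
    (k : List Int → List Int)
    (hpk : ∀ r c : Int, p ([r, c], [c, -r], [-r, -c], [-c, r]) = k [r, c]) :
    (quadsB im).map p = im.map k := by
  unfold quadsB
  rw [List.map_map]
  apply List.map_congr_left
  intro x hx
  have := h x hx
  match x with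
  | [r, c] => exact hpk r c

-- ===== VERDICT (by name: the statement is the Claim_ definition above) =====
theorem makeMoves_spec : Claim_equal_makeMoves := by
  intro im _ hpre
  show makeMoves im = makeMoves_alt im
  have h1 := hpre
  have h2 := rot1_len im h1
  have h3 := rot1_len _ h2
  have h4 := rot1_len _ h3
  -- evaluate A: four rounds
  have hA : makeMoves im
      = [[0, 0]] ++ im ++ im.map rot1 ++ (im.map rot1).map rot1
          ++ ((im.map rot1).map rot1).map rot1 := by
    show ((List.range 4).foldl (fun st _ => (List.range st.2.length).foldl stepA st) ([[0,0]], im)).1 = _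
    rw [show List.range 4 = [0, 1, 2, 3] from rfl]
    simp only [List.foldl_cons, List.foldl_nil]
    rw [inner_round im [[0,0]] h1]
    rw [inner_round _ _ h2]
    rw [inner_round _ _ h3]
    rw [inner_round _ _ h4]
  -- evaluate B: the four projections
  have hB : makeMoves_alt im
      = [[0, 0]] ++ im.map (fun l => l) ++ im.map rot1 ++ im.map (rot1 ∘ rot1)
          ++ im.map (rot1 ∘ rot1 ∘ rot1) := by
    show [[0, 0]] ++ (quadsB im).map (·.1) ++ (quadsB im).map (·.2.1)
        ++ (quadsB im).map (·.2.2.1) ++ (quadsB im).map (·.2.2.2) = _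
    rw [quads_proj im h1 (·.1) (fun l => l) (by intro r c; rfl)]
    rw [quads_proj im h1 (·.2.1) rot1 (by intro r c; simp [rot1])]
    rw [quads_proj im h1 (·.2.2.1) (rot1 ∘ rot1) (by intro r c; simp [rot1])]
    rw [quads_proj im h1 (·.2.2.2) (rot1 ∘ rot1 ∘ rot1) (by intro r c; simp [rot1])]
  rw [hA, hB]
  simp [List.map_map]
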